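-- pv_equiv track=rewrite | github.com/Amir-rfz/DS | CA4/4.py | find_sorted_arrangement
-- ===== SOURCE A (Python) =====
-- def find_sorted_arrangement(n, a, edges):
--     graph = [[] for k in range(0,n)]
--     for i in range(n):
--         for j in range(n):
--             if edges[i][j] == 1:
--                 graph[i].append(j)
--
--     from collections import defaultdict, deque
--
--     def bfs(start):
--         component = []
--         visited.add(start)
--         queue = deque([start])
--         while queue:
--             node = queue.popleft()
--             component.append(node)
--             for neighborNode in graph[node]:
--                 if neighborNode not in visited:
--                     queue.append(neighborNode)
--                     visited.add(neighborNode)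
--         return component
--
--     visited = set()
--     components = []
--     for i in range(n):
--         if i not in visited:
--             components.append(bfs(i))
--
--     result = [5] * n
--     for component in components:
--         indices = sorted(component)
--         values = sorted(a[i] for i in indices)
--         for i in range(len(indices)):
--             idx = indices[i]
--             value = values[i]
--             result[idx] = value
--
--     return result
-- ===== SOURCE B (Python) =====
-- def find_sorted_arrangement(n, a, edges):
--     visited = set()
--
--     def dfs(u, component):
--         visited.add(u)
--         component.append(u)
--         for j in range(n):
--             if edges[u][j] == 1 and j not in visited:
--                 dfs(j, component)
--
--     result = [5] * n
--     for i in range(n):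
--         if i not in visited:
--             component = []
--             dfs(i, component)
--             indices = sorted(component)
--             values = sorted(a[k] for k in component)
--             for idx, v in zip(indices, values):
--                 result[idx] = v
--     return result
-- ===== Notes on version B (the rewrite author's own statement) =====
-- stated objective: simpler
-- what changed: Replaces the adjacency-list build plus explicit-queue BFS with a recursive DFS that scans edges[u] directly and assigns each component's sorted values in place of the separate components list; since each component is sorted before reassignment, traversal order cannot change the result.
import Mathlib
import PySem

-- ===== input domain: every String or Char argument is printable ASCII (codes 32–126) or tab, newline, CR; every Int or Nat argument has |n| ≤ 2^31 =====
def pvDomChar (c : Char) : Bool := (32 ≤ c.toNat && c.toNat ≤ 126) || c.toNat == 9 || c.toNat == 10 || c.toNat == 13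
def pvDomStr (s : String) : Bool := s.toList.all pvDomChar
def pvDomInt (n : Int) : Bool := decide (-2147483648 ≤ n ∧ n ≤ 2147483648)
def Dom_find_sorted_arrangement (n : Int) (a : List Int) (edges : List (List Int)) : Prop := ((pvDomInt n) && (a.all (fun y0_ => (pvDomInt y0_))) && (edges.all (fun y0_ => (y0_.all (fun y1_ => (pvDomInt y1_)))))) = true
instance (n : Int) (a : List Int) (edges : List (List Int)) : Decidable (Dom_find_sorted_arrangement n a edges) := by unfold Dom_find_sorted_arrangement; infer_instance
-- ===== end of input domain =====

-- B replaces A's adjacency-list build + explicit-queue BFS by a recursive DFS that scans the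
-- edge matrix directly and assigns each component's sorted values immediately (objective: simpler).

-- ===== PORT A =====
-- Python's `visited` set is represented by its complement `fresh` (the not-yet-visited nodes,
-- all < n): membership tests and updates correspond exactly, and termination is by |fresh|.

-- inner `for neighborNode in graph[node]` loop of bfs: enqueue unvisited neighbours
def pvEnq (nbrs : List Nat) (q fresh : List Nat) : List Nat × List Nat :=
  nbrs.foldl (fun qf nb => if nb ∈ qf.2 then (qf.1 ++ [nb], qf.2.erase nb) else qf) (q, fresh)

-- the queue+fresh size never grows (cited by pvBfsLoop's termination proof)
theorem pvEnq_sum (nbrs : List Nat) (q fresh : List Nat) :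
    (pvEnq nbrs q fresh).1.length + (pvEnq nbrs q fresh).2.length ≤ q.length + fresh.length := by
  induction nbrs generalizing q fresh with
  | nil => simp [pvEnq]
  | cons nb rest ih =>
    by_cases h : nb ∈ fresh
    · have := ih (q ++ [nb]) (fresh.erase nb)
      have he : (fresh.erase nb).length = fresh.length - 1 := List.length_erase_of_mem h
      have hpos : 1 ≤ fresh.length := List.length_pos_of_mem h
      simp only [pvEnq, List.foldl_cons, if_pos h] at this ⊢
      simp only [List.length_append, List.length_cons, List.length_nil] at this
      omega
    · have := ih q fresh
      simp only [pvEnq, List.foldl_cons, if_neg h] at this ⊢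
      exact this

-- the `while queue:` loop of bfs
def pvBfsLoop (graph : List (List Nat)) : List Nat → List Nat → List Nat → List Nat × List Nat
  | [], fresh, comp => (comp, fresh)
  | node :: q, fresh, comp =>
    let qf := pvEnq (graph.getD node []) q fresh
    pvBfsLoop graph qf.1 qf.2 (comp ++ [node])
termination_by q fresh _ => q.length + fresh.length
decreasing_by
  have := pvEnq_sum (graph.getD node []) q fresh
  simp only [List.length_cons]
  omega

-- `for i in range(n): if i not in visited: components.append(bfs(i))`
def pvOuterA (graph : List (List Nat)) : List Nat → List Nat → List (List Nat)
  | [], _ => []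
  | i :: is, fresh =>
    if i ∈ fresh then
      let cf := pvBfsLoop graph [i] (fresh.erase i) []
      cf.1 :: pvOuterA graph is cf.2
    else pvOuterA graph is fresh

-- per-component reassignment: `indices = sorted(component); values = sorted(a[i] for i in indices); result[idx] = value`
def pvAssignA (a : List Int) (res : List Int) (comp : List Nat) : List Int :=
  let idxs := comp.mergeSort (fun x y => decide (x ≤ y))
  let vals := (idxs.map (fun i => a.getD i 0)).mergeSort (fun x y => decide (x ≤ y))
  (idxs.zip vals).foldl (fun r p => r.set p.1 p.2) res

def find_sorted_arrangement (n : Int) (a : List Int) (edges : List (List Int)) : List Int :=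
  let n' := n.toNat
  -- graph build: graph[i] = [j for j in range(n) if edges[i][j] == 1]
  let graph := (List.range n').map (fun i => (List.range n').filter (fun j => (edges.getD i []).getD j 0 == 1))
  let comps := pvOuterA graph (List.range n') (List.range n')
  comps.foldl (fun res comp => pvAssignA a res comp) (List.replicate n' 5)

-- ===== PORT B =====
-- Recursive DFS over the edge matrix; `visited` is again represented by its complement `fresh`.
-- pvDfsVisit = Python's `dfs(u, component)` body (u unvisited); pvDfsFor = its `for j in range(n)` loop.
-- `fuel` is only a totality guard: every call supplies fuel ≥ |fresh|, so the 0-case is never reached.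
mutual
def pvDfsVisit (adjM : Nat → Nat → Bool) (n' : Nat) : Nat → Nat → List Nat → List Nat × List Nat
  | 0, _, fresh => ([], fresh)
  | fuel + 1, u, fresh =>
    let p := pvDfsFor adjM n' fuel u (List.range n') (fresh.erase u)
    (u :: p.1, p.2)
termination_by fuel _ _ => (fuel, 0)
decreasing_by exact Prod.Lex.left _ _ (Nat.lt_succ_self _)

def pvDfsFor (adjM : Nat → Nat → Bool) (n' : Nat) : Nat → Nat → List Nat → List Nat → List Nat × List Nat
  | fuel, u, j :: rest, fresh =>
    if adjM u j = true ∧ j ∈ fresh then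
      let p1 := pvDfsVisit adjM n' fuel j fresh
      let p2 := pvDfsFor adjM n' fuel u rest p1.2
      (p1.1 ++ p2.1, p2.2)
    else pvDfsFor adjM n' fuel u rest fresh
  | _, _, [], fresh => ([], fresh)
termination_by fuel _ js _ => (fuel, js.length + 1)
decreasing_by
  all_goals (apply Prod.Lex.right; simp only [List.length_cons]; omega)
end

-- `for idx, v in zip(indices, values): result[idx] = v`
def pvPlaceB : List Int → List Nat → List Int → List Int
  | res, idx :: is, v :: vs => pvPlaceB (res.set idx v) is vs
  | res, _, _ => res

-- `indices = sorted(component); values = sorted(a[k] for k in component)` + placement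
def pvAssignB (a : List Int) (res : List Int) (comp : List Nat) : List Int :=
  pvPlaceB res (comp.mergeSort (fun x y => decide (x ≤ y)))
    ((comp.map (fun k => a.getD k 0)).mergeSort (fun x y => decide (x ≤ y)))

-- `for i in range(n): if i not in visited: dfs(i, component); …assign…`
def pvOuterB (adjM : Nat → Nat → Bool) (n' : Nat) (a : List Int) :
    List Nat → List Nat → List Int → List Int
  | [], _, res => res
  | i :: is, fresh, res =>
    if i ∈ fresh then
      let cf := pvDfsVisit adjM n' fresh.length i fresh
      pvOuterB adjM n' a is cf.2 (pvAssignB a res cf.1)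
    else pvOuterB adjM n' a is fresh res

def find_sorted_arrangement_alt (n : Int) (a : List Int) (edges : List (List Int)) : List Int :=
  let n' := n.toNat
  pvOuterB (fun u j => (edges.getD u []).getD j 0 == 1) n' a
    (List.range n') (List.range n') (List.replicate n' 5)

-- ===== PRECONDITION & SPEC =====
-- Pre_ = exactly the inputs where A returns: A indexes a[i] and edges[i][j] for all i, j < n,
-- so it raises IndexError iff n exceeds len(a), len(edges), or some len(edges[i]) with i < n.
def Pre_find_sorted_arrangement (n : Int) (a : List Int) (edges : List (List Int)) : Prop :=
  n ≤ (a.length : Int) ∧ n ≤ (edges.length : Int) ∧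
    ∀ i ∈ List.range n.toNat, n ≤ ((edges.getD i []).length : Int)
instance (n : Int) (a : List Int) (edges : List (List Int)) : Decidable (Pre_find_sorted_arrangement n a edges) := by unfold Pre_find_sorted_arrangement; infer_instance

def pvWitness_find_sorted_arrangement : Int × List Int × List (List Int) :=
  (2, [3, 1], [[0, 1], [0, 0]])

def Spec_find_sorted_arrangement (n : Int) (a : List Int) (edges : List (List Int)) (out : List Int) : Prop := out = find_sorted_arrangement_alt n a edges
instance (n : Int) (a : List Int) (edges : List (List Int)) (out : List Int) : Decidable (Spec_find_sorted_arrangement n a edges out) := by unfold Spec_find_sorted_arrangement; infer_instance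

-- ===== CLAIM (what is proved, stated in full; the proofs are below) =====
def Claim_equal_find_sorted_arrangement : Prop := ∀ (n : Int) (a : List Int) (edges : List (List Int)), Dom_find_sorted_arrangement n a edges → Pre_find_sorted_arrangement n a edges → Spec_find_sorted_arrangement n a edges (find_sorted_arrangement n a edges)

-- ===== LEMMAS AND PROOFS =====

-- Reachability from s through steps whose targets lie in `fresh` (edge relation: y ∈ adj x).
inductive pvRch (adj : Nat → List Nat) (fresh : List Nat) (s : Nat) : Nat → Prop
  | refl : pvRch adj fresh s s
  | step {x y : Nat} : pvRch adj fresh s x → y ∈ adj x → y ∈ fresh → pvRch adj fresh s y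

theorem pvRch_mem {adj : Nat → List Nat} {fresh : List Nat} {s x : Nat}
    (h : pvRch adj fresh s x) : x = s ∨ x ∈ fresh := by
  cases h with
  | refl => exact Or.inl rfl
  | step _ _ hy => exact Or.inr hy

theorem pvRch_mono {adj : Nat → List Nat} {f1 f2 : List Nat} {s x : Nat}
    (hsub : ∀ y, y ∈ f1 → y ∈ f2) (h : pvRch adj f1 s x) : pvRch adj f2 s x := by
  induction h with
  | refl => exact pvRch.refl
  | step _ hadj hy ih => exact pvRch.step ih hadj (hsub _ hy)

theorem pvRch_trans {adj : Nat → List Nat} {f : List Nat} {s m x : Nat}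
    (h1 : pvRch adj f s m) (h2 : pvRch adj f m x) : pvRch adj f s x := by
  induction h2 with
  | refl => exact h1
  | step _ hadj hy ih => exact pvRch.step ih hadj hy

theorem pvRch_adj_congr {adj1 adj2 : Nat → List Nat} {f : List Nat} {s x : Nat}
    (hadj : ∀ z, z = s ∨ z ∈ f → adj1 z = adj2 z) (h : pvRch adj1 f s x) : pvRch adj2 f s x := by
  induction h with
  | refl => exact pvRch.refl
  | step hr hstep hy ih => exact pvRch.step ih (by rw [← hadj _ (pvRch_mem hr)]; exact hstep) hy

theorem pvRch_erase_root {adj : Nat → List Nat} {fresh : List Nat} {s x : Nat}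
    (hnd : fresh.Nodup) (hs : s ∈ fresh) :
    pvRch adj (fresh.erase s) s x ↔ pvRch adj fresh s x := by
  constructor
  · exact pvRch_mono (fun y hy => List.mem_of_mem_erase hy)
  · intro h
    induction h with
    | refl => exact pvRch.refl
    | step hr hadj hy ih =>
      rename_i x' y'
      by_cases hys : y' = s
      · subst hys; exact pvRch.refl
      · exact pvRch.step ih hadj ((List.Nodup.mem_erase_iff hnd).2 ⟨hys, hy⟩)

-- adjacency list the proofs reason about: [j for j in range(n') if adjM u j]
def pvAdjL (adjM : Nat → Nat → Bool) (n' : Nat) (u : Nat) : List Nat :=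
  (List.range n').filter (fun j => adjM u j)

-- characterisation of one pass of A's neighbour-enqueueing fold
theorem pvEnq_char {l q fresh : List Nat} (hq : q.Nodup) (hf : fresh.Nodup)
    (hd : ∀ x, x ∈ q → x ∈ fresh → False) :
    (∀ x, x ∈ (pvEnq l q fresh).1 ↔ x ∈ q ∨ (x ∈ l ∧ x ∈ fresh)) ∧
    (∀ x, x ∈ (pvEnq l q fresh).2 ↔ x ∈ fresh ∧ x ∉ l) ∧
    (pvEnq l q fresh).1.Nodup ∧ (pvEnq l q fresh).2.Nodup ∧
    (∀ x, x ∈ (pvEnq l q fresh).1 → x ∈ (pvEnq l q fresh).2 → False) := by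
  induction l generalizing q fresh with
  | nil =>
    refine ⟨fun x => by simp [pvEnq], fun x => by simp [pvEnq], hq, hf, hd⟩
  | cons nb rest ih =>
    by_cases hnb : nb ∈ fresh
    · have he : ∀ x, x ∈ fresh.erase nb ↔ x ≠ nb ∧ x ∈ fresh :=
        fun x => List.Nodup.mem_erase_iff hf
      have hq' : (q ++ [nb]).Nodup := by
        refine List.Nodup.append hq (List.nodup_singleton nb) ?_
        intro x hxq hxnb
        rw [List.mem_singleton] at hxnb
        subst hxnb
        exact hd _ hxq hnb
      have hf' : (fresh.erase nb).Nodup := hf.erase nb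
      have hd' : ∀ x, x ∈ q ++ [nb] → x ∈ fresh.erase nb → False := by
        intro x hx1 hx2
        rcases (he x).1 hx2 with ⟨hne, hxf⟩
        rcases List.mem_append.1 hx1 with h | h
        · exact hd x h hxf
        · rw [List.mem_singleton] at h; exact hne h
      have step : pvEnq (nb :: rest) q fresh = pvEnq rest (q ++ [nb]) (fresh.erase nb) := by
        simp [pvEnq, hnb]
      obtain ⟨m1, m2, n1, n2, dd⟩ := ih hq' hf' hd'
      rw [step]
      refine ⟨?_, ?_, n1, n2, dd⟩
      · intro x
        rw [m1 x]
        constructor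
        · rintro (hx | ⟨hxr, hxe⟩)
          · rcases List.mem_append.1 hx with h | h
            · exact Or.inl h
            · rw [List.mem_singleton] at h; subst h
              exact Or.inr ⟨List.mem_cons_self .., hnb⟩
          · exact Or.inr ⟨List.mem_cons_of_mem _ hxr, ((he x).1 hxe).2⟩
        · rintro (hx | ⟨hxl, hxf⟩)
          · exact Or.inl (List.mem_append.2 (Or.inl hx))
          · rcases List.mem_cons.1 hxl with h | h
            · subst h; exact Or.inl (by simp)
            · by_cases hxe : x = nb
              · subst hxe; exact Or.inl (by simp)
              · exact Or.inr ⟨h, (he x).2 ⟨hxe, hxf⟩⟩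
      · intro x
        rw [m2 x]
        constructor
        · rintro ⟨hxe, hxr⟩
          rcases (he x).1 hxe with ⟨hne, hxf⟩
          refine ⟨hxf, fun hmem => ?_⟩
          rcases List.mem_cons.1 hmem with h | h
          · exact hne h
          · exact hxr h
        · rintro ⟨hxf, hxl⟩
          have hne : x ≠ nb := fun h => hxl (h ▸ List.mem_cons_self ..)
          exact ⟨(he x).2 ⟨hne, hxf⟩, fun h => hxl (List.mem_cons_of_mem _ h)⟩
    · have step : pvEnq (nb :: rest) q fresh = pvEnq rest q fresh := by
        simp [pvEnq, hnb]
      obtain ⟨m1, m2, n1, n2, dd⟩ := ih hq hf hd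
      rw [step]
      refine ⟨?_, ?_, n1, n2, dd⟩
      · intro x
        rw [m1 x]
        constructor
        · rintro (h | ⟨h1, h2⟩)
          · exact Or.inl h
          · exact Or.inr ⟨List.mem_cons_of_mem _ h1, h2⟩
        · rintro (h | ⟨h1, h2⟩)
          · exact Or.inl h
          · rcases List.mem_cons.1 h1 with h | h
            · subst h; exact absurd h2 hnb
            · exact Or.inr ⟨h, h2⟩
      · intro x
        rw [m2 x]
        constructor
        · rintro ⟨h1, h2⟩
          refine ⟨h1, fun hmem => ?_⟩
          rcases List.mem_cons.1 hmem with h | h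
          · subst h; exact hnb h1
          · exact h2 h
        · rintro ⟨h1, h2⟩
          exact ⟨h1, fun h => h2 (List.mem_cons_of_mem _ h)⟩

-- frontier expansion: popping `node` and enqueueing its fresh neighbours preserves reachability
theorem pvFrontier {adj : Nat → List Nat} {fresh q q' f' : List Nat} {node : Nat}
    (hq' : ∀ y, y ∈ q' ↔ y ∈ q ∨ (y ∈ adj node ∧ y ∈ fresh))
    (hf' : ∀ y, y ∈ f' ↔ y ∈ fresh ∧ y ∉ adj node) (x : Nat) :
    (∃ s ∈ node :: q, pvRch adj fresh s x) ↔ x = node ∨ ∃ s ∈ q', pvRch adj f' s x := by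
  constructor
  · rintro ⟨s, hs, hrch⟩
    induction hrch with
    | refl =>
      rcases List.mem_cons.1 hs with h | h
      · exact Or.inl h
      · exact Or.inr ⟨s, (hq' s).2 (Or.inl h), pvRch.refl⟩
    | step hr hadj hyf ih =>
      rename_i zx zy
      rcases ih with h | ⟨t, htq, htr⟩
      · subst h
        exact Or.inr ⟨zy, (hq' zy).2 (Or.inr ⟨hadj, hyf⟩), pvRch.refl⟩
      · by_cases hmem : zy ∈ adj node
        · exact Or.inr ⟨zy, (hq' zy).2 (Or.inr ⟨hmem, hyf⟩), pvRch.refl⟩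
        · exact Or.inr ⟨t, htq, pvRch.step htr hadj ((hf' zy).2 ⟨hyf, hmem⟩)⟩
  · intro h
    have hsubf : ∀ y, y ∈ f' → y ∈ fresh := fun y hy => ((hf' y).1 hy).1
    rcases h with rfl | ⟨s, hsq, hrch⟩
    · exact ⟨x, List.mem_cons_self .., pvRch.refl⟩
    · rcases (hq' s).1 hsq with h | ⟨hadj, hsf⟩
      · exact ⟨s, List.mem_cons_of_mem _ h, pvRch_mono hsubf hrch⟩
      · exact ⟨node, List.mem_cons_self ..,
          pvRch_trans (pvRch.step pvRch.refl hadj hsf) (pvRch_mono hsubf hrch)⟩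

-- full characterisation of A's BFS loop: component = multi-source reachability, fresh' = rest
theorem pvBfsLoop_char (graph : List (List Nat)) :
    ∀ (k : Nat) (q fresh comp : List Nat), q.length + fresh.length ≤ k → q.Nodup → fresh.Nodup →
    comp.Nodup →
    (∀ x, x ∈ q → x ∈ fresh → False) → (∀ x, x ∈ comp → x ∈ fresh → False) →
    (∀ x, x ∈ comp → x ∈ q → False) →
    (∀ x, x ∈ (pvBfsLoop graph q fresh comp).1 ↔
        x ∈ comp ∨ ∃ s ∈ q, pvRch (fun u => graph.getD u []) fresh s x) ∧
    (∀ x, x ∈ (pvBfsLoop graph q fresh comp).2 ↔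
        x ∈ fresh ∧ ¬ ∃ s ∈ q, pvRch (fun u => graph.getD u []) fresh s x) ∧
    (pvBfsLoop graph q fresh comp).1.Nodup ∧ (pvBfsLoop graph q fresh comp).2.Nodup := by
  intro k
  induction k with
  | zero =>
    intro q fresh comp hk _ hfnd hcnd _ hdcf _
    have hq : q = [] := List.length_eq_zero_iff.1 (by omega : q.length = 0)
    subst hq
    have heq0 : pvBfsLoop graph [] fresh comp = (comp, fresh) := by rw [pvBfsLoop]
    rw [heq0]
    exact ⟨fun x => by simp, fun x => by simp, hcnd, hfnd⟩
  | succ k ih =>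
    intro q fresh comp hk hqnd hfnd hcnd hdqf hdcf hdcq
    match q with
    | [] =>
      have heq0 : pvBfsLoop graph [] fresh comp = (comp, fresh) := by rw [pvBfsLoop]
      rw [heq0]
      exact ⟨fun x => by simp, fun x => by simp, hcnd, hfnd⟩
    | node :: q =>
      have hnodeq : node ∉ q := (List.nodup_cons.1 hqnd).1
      have hqnd' : q.Nodup := (List.nodup_cons.1 hqnd).2
      have hnodef : node ∉ fresh := fun h => hdqf node (List.mem_cons_self ..) h
      have hdqf' : ∀ x, x ∈ q → x ∈ fresh → False :=
        fun x hx hf => hdqf x (List.mem_cons_of_mem _ hx) hf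
      obtain ⟨m1, m2, n1, n2, dd⟩ :=
        pvEnq_char (l := graph.getD node []) hqnd' hfnd hdqf'
      have heq : pvBfsLoop graph (node :: q) fresh comp =
          pvBfsLoop graph (pvEnq (graph.getD node []) q fresh).1
            (pvEnq (graph.getD node []) q fresh).2 (comp ++ [node]) := by
        rw [pvBfsLoop]
      have hcnd' : (comp ++ [node]).Nodup := by
        refine List.Nodup.append hcnd (List.nodup_singleton node) ?_
        intro x hxc hxn
        rw [List.mem_singleton] at hxn
        subst hxn
        exact hdcq _ hxc (List.mem_cons_self ..)
      have hdcf2 : ∀ x, x ∈ comp ++ [node] → x ∈ (pvEnq (graph.getD node []) q fresh).2 → False := by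
        intro x hx1 hx2
        have hxf : x ∈ fresh := ((m2 x).1 hx2).1
        rcases List.mem_append.1 hx1 with h | h
        · exact hdcf x h hxf
        · rw [List.mem_singleton] at h; subst h; exact hnodef hxf
      have hdcq2 : ∀ x, x ∈ comp ++ [node] → x ∈ (pvEnq (graph.getD node []) q fresh).1 → False := by
        intro x hx1 hx2
        rcases (m1 x).1 hx2 with h | ⟨_, hxf⟩
        · rcases List.mem_append.1 hx1 with h1 | h1
          · exact hdcq x h1 (List.mem_cons_of_mem _ h)
          · rw [List.mem_singleton] at h1; subst h1; exact hnodeq h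
        · rcases List.mem_append.1 hx1 with h1 | h1
          · exact hdcf x h1 hxf
          · rw [List.mem_singleton] at h1; subst h1; exact hnodef hxf
      have hklen : (pvEnq (graph.getD node []) q fresh).1.length +
          (pvEnq (graph.getD node []) q fresh).2.length ≤ k := by
        have := pvEnq_sum (graph.getD node []) q fresh
        simp only [List.length_cons] at hk
        omega
      obtain ⟨M1, M2, N1, N2⟩ := ih _ _ _ hklen n1 n2 hcnd' dd hdcf2 hdcq2
      have hfr := pvFrontier (adj := fun u => graph.getD u []) m1 m2
      rw [heq]
      refine ⟨?_, ?_, N1, N2⟩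
      · intro x
        rw [M1 x, hfr x]
        simp only [List.mem_append, List.mem_singleton]
        tauto
      · intro x
        rw [M2 x, hfr x, m2 x]
        constructor
        · rintro ⟨⟨hxf, _⟩, hne⟩
          refine ⟨hxf, fun h => ?_⟩
          rcases h with rfl | hE
          · exact hnodef hxf
          · exact hne hE
        · rintro ⟨hxf, hne⟩
          refine ⟨⟨hxf, fun hxa =>
            hne (Or.inr ⟨x, (m1 x).2 (Or.inr ⟨hxa, hxf⟩), pvRch.refl⟩)⟩,
            fun hE => hne (Or.inr hE)⟩

-- unfolding reachability at the root: reach(u, fresh) = {u} ∪ ⋃ {reach(j, fresh∖{u}) | edge u→j, j fresh}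
theorem pvRch_root {adjM : Nat → Nat → Bool} {n' : Nat} {fresh : List Nat} {u : Nat}
    (hnd : fresh.Nodup) (hu : u ∈ fresh) (hsub : ∀ x ∈ fresh, x ∈ List.range n') (x : Nat) :
    (x ∈ fresh ∧ pvRch (pvAdjL adjM n') fresh u x) ↔
      x = u ∨ ∃ j ∈ List.range n', adjM u j = true ∧ j ∈ fresh.erase u ∧
        pvRch (pvAdjL adjM n') (fresh.erase u) j x := by
  have hadj : ∀ a b : Nat, b ∈ pvAdjL adjM n' a ↔ b ∈ List.range n' ∧ adjM a b = true := by
    intro a b; simp [pvAdjL, List.mem_filter]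
  constructor
  · rintro ⟨hxf, hr⟩
    clear hxf
    induction hr with
    | refl => exact Or.inl rfl
    | step hr hstep hyf ih =>
      rename_i z y
      by_cases hyu : y = u
      · exact Or.inl hyu
      · have hye : y ∈ fresh.erase u := (List.Nodup.mem_erase_iff hnd).2 ⟨hyu, hyf⟩
        rcases ih with rfl | ⟨j, hjr, hja, hje, hjrch⟩
        · exact Or.inr ⟨y, hsub y hyf, ((hadj z y).1 hstep).2, hye, pvRch.refl⟩
        · exact Or.inr ⟨j, hjr, hja, hje, pvRch.step hjrch hstep hye⟩
  · rintro (rfl | ⟨j, hjr, hja, hje, hjrch⟩)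
    · exact ⟨hu, pvRch.refl⟩
    · have hjf : j ∈ fresh := List.mem_of_mem_erase hje
      have hx : pvRch (pvAdjL adjM n') fresh u x :=
        pvRch_trans (pvRch.step pvRch.refl ((hadj u j).2 ⟨hsub j hjf, hja⟩) hjf)
          (pvRch_mono (fun y hy => List.mem_of_mem_erase hy) hjrch)
      have hxf : x ∈ fresh := by
        rcases pvRch_mem hjrch with rfl | h
        · exact hjf
        · exact List.mem_of_mem_erase h
      exact ⟨hxf, hx⟩

-- a reach derivation that ends outside a step-closed set R never enters R
theorem pvRch_restrict {adj : Nat → List Nat} {fresh f1 : List Nat} (R : Nat → Prop)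
    (hcl : ∀ z y, R z → y ∈ adj z → y ∈ fresh → R y)
    (hf1 : ∀ y, y ∈ f1 ↔ y ∈ fresh ∧ ¬ R y) {k x : Nat}
    (h : pvRch adj fresh k x) (hx : ¬ R x) : pvRch adj f1 k x ∧ ¬ R k := by
  induction h with
  | refl => exact ⟨pvRch.refl, hx⟩
  | step hr hadj hyf ih =>
    rename_i z y
    have hz : ¬ R z := fun hRz => hx (hcl z y hRz hadj hyf)
    obtain ⟨hrch, hk⟩ := ih hz
    exact ⟨pvRch.step hrch hadj ((hf1 y).2 ⟨hyf, hx⟩), hk⟩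

-- with no fresh nodes at all, B's neighbour loop does nothing
theorem pvDfsFor_nil (adjM : Nat → Nat → Bool) (n' : Nat) :
    ∀ (js : List Nat) (fuel u : Nat), pvDfsFor adjM n' fuel u js [] = ([], []) := by
  intro js
  induction js with
  | nil => intro fuel u; rw [pvDfsFor]
  | cons j rest ih =>
    intro fuel u
    rw [pvDfsFor]
    simp [ih]

-- full characterisation of B's DFS: component = reachability within fresh, fresh' = the rest
theorem pvDfs_char (adjM : Nat → Nat → Bool) (n' : Nat) :
    ∀ fuel : Nat,
      (∀ fresh : List Nat, fresh.length ≤ fuel → fresh.Nodup →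
        (∀ x ∈ fresh, x ∈ List.range n') → ∀ u, u ∈ fresh →
        (∀ x, x ∈ (pvDfsVisit adjM n' fuel u fresh).1 ↔
            x ∈ fresh ∧ pvRch (pvAdjL adjM n') fresh u x) ∧
        (∀ x, x ∈ (pvDfsVisit adjM n' fuel u fresh).2 ↔
            x ∈ fresh ∧ ¬ pvRch (pvAdjL adjM n') fresh u x) ∧
        (pvDfsVisit adjM n' fuel u fresh).1.Nodup ∧ (pvDfsVisit adjM n' fuel u fresh).2.Nodup) ∧
      (∀ (js fresh : List Nat), fresh.length ≤ fuel → fresh.Nodup →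
        (∀ x ∈ fresh, x ∈ List.range n') → ∀ u,
        (∀ x, x ∈ (pvDfsFor adjM n' fuel u js fresh).1 ↔
            ∃ j ∈ js, adjM u j = true ∧ j ∈ fresh ∧ pvRch (pvAdjL adjM n') fresh j x) ∧
        (∀ x, x ∈ (pvDfsFor adjM n' fuel u js fresh).2 ↔
            x ∈ fresh ∧ ¬ ∃ j ∈ js, adjM u j = true ∧ j ∈ fresh ∧ pvRch (pvAdjL adjM n') fresh j x) ∧
        (pvDfsFor adjM n' fuel u js fresh).1.Nodup ∧ (pvDfsFor adjM n' fuel u js fresh).2.Nodup) := by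
  intro fuel
  induction fuel with
  | zero =>
    constructor
    · intro fresh hlen _ _ u hu
      have : fresh = [] := List.length_eq_zero_iff.1 (by omega)
      subst this
      exact absurd hu (List.not_mem_nil)
    · intro js fresh hlen _ _ u
      have : fresh = [] := List.length_eq_zero_iff.1 (by omega)
      subst this
      rw [pvDfsFor_nil]
      refine ⟨fun x => by simp, fun x => by simp, List.nodup_nil, List.nodup_nil⟩
  | succ fuel ih =>
    have hP : ∀ fresh : List Nat, fresh.length ≤ fuel + 1 → fresh.Nodup →
        (∀ x ∈ fresh, x ∈ List.range n') → ∀ u, u ∈ fresh →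
        (∀ x, x ∈ (pvDfsVisit adjM n' (fuel + 1) u fresh).1 ↔
            x ∈ fresh ∧ pvRch (pvAdjL adjM n') fresh u x) ∧
        (∀ x, x ∈ (pvDfsVisit adjM n' (fuel + 1) u fresh).2 ↔
            x ∈ fresh ∧ ¬ pvRch (pvAdjL adjM n') fresh u x) ∧
        (pvDfsVisit adjM n' (fuel + 1) u fresh).1.Nodup ∧
        (pvDfsVisit adjM n' (fuel + 1) u fresh).2.Nodup := by
      intro fresh hlen hnd hsub u hu
      have hlen' : (fresh.erase u).length ≤ fuel := by
        have h1 : (fresh.erase u).length = fresh.length - 1 := List.length_erase_of_mem hu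
        have h2 : 1 ≤ fresh.length := List.length_pos_of_mem hu
        omega
      have hnd' : (fresh.erase u).Nodup := hnd.erase u
      have hsub' : ∀ x ∈ fresh.erase u, x ∈ List.range n' :=
        fun x hx => hsub x (List.mem_of_mem_erase hx)
      obtain ⟨q1, q2, q3, q4⟩ := ih.2 (List.range n') (fresh.erase u) hlen' hnd' hsub' u
      have heq : pvDfsVisit adjM n' (fuel + 1) u fresh =
          ((u :: (pvDfsFor adjM n' fuel u (List.range n') (fresh.erase u)).1),
            (pvDfsFor adjM n' fuel u (List.range n') (fresh.erase u)).2) := by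
        rw [pvDfsVisit]
      have hroot := pvRch_root (adjM := adjM) (n' := n') hnd hu hsub
      rw [heq]
      refine ⟨?_, ?_, ?_, q4⟩
      · intro x
        simp only [List.mem_cons]
        rw [q1 x]
        exact (hroot x).symm
      · intro x
        rw [q2 x]
        constructor
        · rintro ⟨hxe, hnot⟩
          obtain ⟨hne, hxf⟩ := (List.Nodup.mem_erase_iff hnd).1 hxe
          refine ⟨hxf, fun hr => ?_⟩
          rcases (hroot x).1 ⟨hxf, hr⟩ with rfl | hex
          · exact hne rfl
          · exact hnot hex
        · rintro ⟨hxf, hnr⟩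
          have hne : x ≠ u := fun h => hnr (h ▸ pvRch.refl)
          refine ⟨(List.Nodup.mem_erase_iff hnd).2 ⟨hne, hxf⟩, fun hex => ?_⟩
          exact hnr ((hroot x).2 (Or.inr hex)).2
      · refine List.nodup_cons.2 ⟨fun hmem => ?_, q3⟩
        obtain ⟨j, _, _, hje, hjrch⟩ := (q1 u).1 hmem
        have : u ∈ fresh.erase u := by
          rcases pvRch_mem hjrch with rfl | h
          · exact hje
          · exact h
        exact ((List.Nodup.mem_erase_iff hnd).1 this).1 rfl
    refine ⟨hP, ?_⟩
    intro js
    induction js with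
    | nil =>
      intro fresh hlen hnd hsub u
      have heq : pvDfsFor adjM n' (fuel + 1) u [] fresh = ([], fresh) := by rw [pvDfsFor]
      rw [heq]
      exact ⟨fun x => by simp, fun x => by simp, List.nodup_nil, hnd⟩
    | cons j rest ihjs =>
      intro fresh hlen hnd hsub u
      by_cases hc : adjM u j = true ∧ j ∈ fresh
      · obtain ⟨v1, v2, v3, v4⟩ := hP fresh hlen hnd hsub j hc.2
        have hsubp : ∀ x ∈ (pvDfsVisit adjM n' (fuel + 1) j fresh).2, x ∈ fresh :=
          fun x hx => ((v2 x).1 hx).1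
        have hlen2 : (pvDfsVisit adjM n' (fuel + 1) j fresh).2.length ≤ fuel + 1 :=
          le_trans (List.Subperm.length_le (List.subperm_of_subset v4 hsubp)) hlen
        have hsub2 : ∀ x ∈ (pvDfsVisit adjM n' (fuel + 1) j fresh).2, x ∈ List.range n' :=
          fun x hx => hsub x (hsubp x hx)
        obtain ⟨w1, w2, w3, w4⟩ :=
          ihjs (pvDfsVisit adjM n' (fuel + 1) j fresh).2 hlen2 v4 hsub2 u
        have heq : pvDfsFor adjM n' (fuel + 1) u (j :: rest) fresh =
            ((pvDfsVisit adjM n' (fuel + 1) j fresh).1 ++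
              (pvDfsFor adjM n' (fuel + 1) u rest (pvDfsVisit adjM n' (fuel + 1) j fresh).2).1,
             (pvDfsFor adjM n' (fuel + 1) u rest (pvDfsVisit adjM n' (fuel + 1) j fresh).2).2) := by
          rw [pvDfsFor]
          simp [hc]
        -- R = the component of j; it is closed under fresh steps
        have hcl : ∀ z y, (z ∈ fresh ∧ pvRch (pvAdjL adjM n') fresh j z) →
            y ∈ pvAdjL adjM n' z → y ∈ fresh → (y ∈ fresh ∧ pvRch (pvAdjL adjM n') fresh j y) :=
          fun z y hz hyadj hyf => ⟨hyf, pvRch.step hz.2 hyadj hyf⟩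
        have hf1 : ∀ y, y ∈ (pvDfsVisit adjM n' (fuel + 1) j fresh).2 ↔
            y ∈ fresh ∧ ¬ (y ∈ fresh ∧ pvRch (pvAdjL adjM n') fresh j y) := by
          intro y
          rw [v2 y]
          constructor
          · rintro ⟨hyf, hnr⟩
            exact ⟨hyf, fun hr => hnr hr.2⟩
          · rintro ⟨hyf, hnR⟩
            exact ⟨hyf, fun hr => hnR ⟨hyf, hr⟩⟩
        have transfer : ∀ x, ¬ (x ∈ fresh ∧ pvRch (pvAdjL adjM n') fresh j x) →
            ((∃ j' ∈ rest, adjM u j' = true ∧ j' ∈ (pvDfsVisit adjM n' (fuel + 1) j fresh).2 ∧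
                pvRch (pvAdjL adjM n') (pvDfsVisit adjM n' (fuel + 1) j fresh).2 j' x) ↔
             (∃ j' ∈ rest, adjM u j' = true ∧ j' ∈ fresh ∧
                pvRch (pvAdjL adjM n') fresh j' x)) := by
          intro x hx
          constructor
          · rintro ⟨j', hm, ha, hjf, hr⟩
            exact ⟨j', hm, ha, hsubp j' hjf, pvRch_mono hsubp hr⟩
          · rintro ⟨j', hm, ha, hjf, hr⟩
            obtain ⟨hrch1, hnRj⟩ := pvRch_restrict _ hcl hf1 hr hx
            exact ⟨j', hm, ha, (hf1 j').2 ⟨hjf, hnRj⟩, hrch1⟩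
        rw [heq]
        refine ⟨?_, ?_, ?_, w4⟩
        · intro x
          simp only [List.mem_append, List.mem_cons]
          rw [v1 x, w1 x]
          constructor
          · rintro (hR | hSR)
            · exact ⟨j, Or.inl rfl, hc.1, hc.2, hR.2⟩
            · have hnR : ¬ (x ∈ fresh ∧ pvRch (pvAdjL adjM n') fresh j x) := by
                intro hR
                obtain ⟨j', _, _, hjf, hr⟩ := hSR
                have hxm : x ∈ (pvDfsVisit adjM n' (fuel + 1) j fresh).2 := by
                  rcases pvRch_mem hr with rfl | h
                  · exact hjf
                  · exact h
                exact ((hf1 x).1 hxm).2 hR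
              obtain ⟨j', hm, ha, hjf, hr⟩ := (transfer x hnR).1 hSR
              exact ⟨j', Or.inr hm, ha, hjf, hr⟩
          · rintro ⟨j', hm, ha, hjf, hr⟩
            rcases hm with rfl | hm
            · left
              refine ⟨?_, hr⟩
              rcases pvRch_mem hr with rfl | h
              · exact hjf
              · exact h
            · by_cases hR : x ∈ fresh ∧ pvRch (pvAdjL adjM n') fresh j x
              · exact Or.inl hR
              · exact Or.inr ((transfer x hR).2 ⟨j', hm, ha, hjf, hr⟩)
        · intro x
          rw [w2 x, hf1 x]
          constructor
          · rintro ⟨⟨hxf, hnR⟩, hnSR⟩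
            refine ⟨hxf, fun hex => ?_⟩
            obtain ⟨j', hm, ha, hjf, hr⟩ := hex
            rcases List.mem_cons.1 hm with rfl | hm
            · exact hnR ⟨hxf, hr⟩
            · exact hnSR ((transfer x hnR).2 ⟨j', hm, ha, hjf, hr⟩)
          · rintro ⟨hxf, hne⟩
            have hnR : ¬ (x ∈ fresh ∧ pvRch (pvAdjL adjM n') fresh j x) :=
              fun hR => hne ⟨j, List.mem_cons_self .., hc.1, hc.2, hR.2⟩
            refine ⟨⟨hxf, hnR⟩, fun hSR => ?_⟩
            obtain ⟨j', hm, ha, hjf, hr⟩ := (transfer x hnR).1 hSR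
            exact hne ⟨j', List.mem_cons_of_mem _ hm, ha, hjf, hr⟩
        · refine List.Nodup.append v3 w3 ?_
          intro x hx1 hx2
          have hR : x ∈ fresh ∧ pvRch (pvAdjL adjM n') fresh j x := (v1 x).1 hx1
          obtain ⟨j', _, _, hjf, hr⟩ := (w1 x).1 hx2
          have hxm : x ∈ (pvDfsVisit adjM n' (fuel + 1) j fresh).2 := by
            rcases pvRch_mem hr with rfl | h
            · exact hjf
            · exact h
          exact ((hf1 x).1 hxm).2 hR
      · have heq : pvDfsFor adjM n' (fuel + 1) u (j :: rest) fresh =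
            pvDfsFor adjM n' (fuel + 1) u rest fresh := by
          rw [pvDfsFor]
          simp [hc]
        obtain ⟨w1, w2, w3, w4⟩ := ihjs fresh hlen hnd hsub u
        rw [heq]
        refine ⟨?_, ?_, w3, w4⟩
        · intro x
          rw [w1 x]
          constructor
          · rintro ⟨j', hm, h⟩
            exact ⟨j', List.mem_cons_of_mem _ hm, h⟩
          · rintro ⟨j', hm, ha, hjf, hr⟩
            rcases List.mem_cons.1 hm with rfl | hm
            · exact absurd ⟨ha, hjf⟩ hc
            · exact ⟨j', hm, ha, hjf, hr⟩
        · intro x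
          rw [w2 x]
          constructor
          · rintro ⟨hxf, hne⟩
            refine ⟨hxf, fun hex => ?_⟩
            obtain ⟨j', hm, ha, hjf, hr⟩ := hex
            rcases List.mem_cons.1 hm with rfl | hm
            · exact absurd ⟨ha, hjf⟩ hc
            · exact hne ⟨j', hm, ha, hjf, hr⟩
          · rintro ⟨hxf, hne⟩
            exact ⟨hxf, fun ⟨j', hm, h⟩ => hne ⟨j', List.mem_cons_of_mem _ hm, h⟩⟩

-- sorting is determined by the multiset (total order ⇒ sorted representative is unique)
theorem pvSort_eq {α : Type} [LinearOrder α] {l1 l2 : List α} (h : List.Perm l1 l2) :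
    l1.mergeSort (fun x y => decide (x ≤ y)) = l2.mergeSort (fun x y => decide (x ≤ y)) :=
  List.Perm.eq_of_pairwise' (r := (· ≤ ·))
    (List.pairwise_mergeSort' _ l1) (List.pairwise_mergeSort' _ l2)
    (((List.mergeSort_perm l1 _).trans h).trans (List.mergeSort_perm l2 _).symm)

-- B's placement recursion = A's fold over the zipped pairs
theorem pvPlaceB_eq : ∀ (is : List Nat) (vs : List Int) (res : List Int),
    pvPlaceB res is vs = (is.zip vs).foldl (fun r p => r.set p.1 p.2) res := by
  intro is
  induction is with
  | nil => intro vs res; cases vs <;> simp [pvPlaceB]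
  | cons i is ih =>
    intro vs res
    cases vs with
    | nil => simp [pvPlaceB]
    | cons v vs => simp [pvPlaceB, ih]

-- equal component sets (no duplicates) ⇒ identical reassignment
theorem pvAssign_eq (a res : List Int) {c1 c2 : List Nat} (h1 : c1.Nodup) (h2 : c2.Nodup)
    (hmem : ∀ x, x ∈ c1 ↔ x ∈ c2) : pvAssignA a res c1 = pvAssignB a res c2 := by
  have hperm : List.Perm c1 c2 := (List.perm_ext_iff_of_nodup h1 h2).mpr hmem
  have hidx : c1.mergeSort (fun x y => decide (x ≤ y)) =
      c2.mergeSort (fun x y => decide (x ≤ y)) := pvSort_eq hperm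
  have hvals : ((c1.mergeSort (fun x y => decide (x ≤ y))).map (fun i => a.getD i 0)).mergeSort
        (fun x y => decide (x ≤ y)) =
      (c2.map (fun k => a.getD k 0)).mergeSort (fun x y => decide (x ≤ y)) :=
    pvSort_eq (List.Perm.map _ ((List.mergeSort_perm c1 _).trans hperm))
  unfold pvAssignA pvAssignB
  rw [pvPlaceB_eq, ← hidx, ← hvals]

-- A's prebuilt graph rows agree with the proofs' adjacency lists on nodes < n'
theorem pvGraph_adj (edges : List (List Int)) (n' : Nat) {u : Nat} (hu : u ∈ List.range n') :
    ((List.range n').map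
        (fun i => (List.range n').filter (fun j => (edges.getD i []).getD j 0 == 1))).getD u []
      = pvAdjL (fun v j => (edges.getD v []).getD j 0 == 1) n' u := by
  have hu' : u < n' := List.mem_range.1 hu
  rw [List.getD_eq_getElem?_getD]
  simp [hu', pvAdjL]

-- lockstep equality of the two outer loops
theorem pvOuter_eq (a : List Int) (edges : List (List Int)) (n' : Nat) :
    ∀ (is fA fB : List Nat) (res : List Int), fA.Nodup → fB.Nodup →
      (∀ x, x ∈ fA ↔ x ∈ fB) → (∀ x ∈ fB, x ∈ List.range n') →
      (pvOuterA ((List.range n').map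
          (fun i => (List.range n').filter (fun j => (edges.getD i []).getD j 0 == 1))) is fA).foldl
        (fun res comp => pvAssignA a res comp) res
      = pvOuterB (fun u j => (edges.getD u []).getD j 0 == 1) n' a is fB res := by
  intro is
  induction is with
  | nil => intro fA fB res _ _ _ _; simp [pvOuterA, pvOuterB]
  | cons i is ih =>
    intro fA fB res hAnd hBnd hmem hsub
    by_cases hiB : i ∈ fB
    · have hiA : i ∈ fA := (hmem i).2 hiB
      have hirange : i ∈ List.range n' := hsub i hiB
      -- characterise A's BFS component
      obtain ⟨A1, A2, A3, A4⟩ := pvBfsLoop_char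
        ((List.range n').map
          (fun i => (List.range n').filter (fun j => (edges.getD i []).getD j 0 == 1)))
        (1 + (fA.erase i).length) [i] (fA.erase i) []
        (by simp) (List.nodup_singleton i) (hAnd.erase i) List.nodup_nil
        (by
          intro x hx hxe
          rw [List.mem_singleton] at hx
          subst hx
          exact ((List.Nodup.mem_erase_iff hAnd).1 hxe).1 rfl)
        (by intro x hx; simp at hx) (by intro x hx; simp at hx)
      -- characterise B's DFS component
      obtain ⟨B1, B2, B3, B4⟩ := (pvDfs_char (fun u j => (edges.getD u []).getD j 0 == 1) n'
        fB.length).1 fB le_rfl hBnd hsub i hiB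
      -- bridge between the two adjacency representations and the two fresh lists
      have hadjeq : ∀ z, (z = i ∨ z ∈ fA.erase i) →
          ((List.range n').map
            (fun i => (List.range n').filter (fun j => (edges.getD i []).getD j 0 == 1))).getD z []
          = pvAdjL (fun v j => (edges.getD v []).getD j 0 == 1) n' z := by
        rintro z (rfl | hz)
        · exact pvGraph_adj edges n' hirange
        · exact pvGraph_adj edges n'
            (hsub z ((hmem z).1 (List.mem_of_mem_erase hz)))
      have heraseiff : ∀ x, x ∈ fA.erase i ↔ x ∈ fB.erase i := by
        intro x
        rw [List.Nodup.mem_erase_iff hAnd, List.Nodup.mem_erase_iff hBnd, hmem x]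
      have hbridge : ∀ x, pvRch (fun u =>
          ((List.range n').map
            (fun i => (List.range n').filter (fun j => (edges.getD i []).getD j 0 == 1))).getD u [])
            (fA.erase i) i x ↔
          pvRch (pvAdjL (fun v j => (edges.getD v []).getD j 0 == 1) n') (fB.erase i) i x := by
        intro x
        constructor
        · intro h
          exact pvRch_mono (fun y hy => (heraseiff y).1 hy) (pvRch_adj_congr hadjeq h)
        · intro h
          have h' := pvRch_mono (fun y hy => (heraseiff y).2 hy) h
          exact pvRch_adj_congr (fun z hz => (hadjeq z hz).symm) h'
      have heroot := fun x => pvRch_erase_root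
        (adj := pvAdjL (fun v j => (edges.getD v []).getD j 0 == 1) n') (x := x) hBnd hiB
      -- the two components are the same set
      have hcompmem : ∀ x,
          x ∈ (pvBfsLoop ((List.range n').map
              (fun i => (List.range n').filter (fun j => (edges.getD i []).getD j 0 == 1)))
              [i] (fA.erase i) []).1 ↔
          x ∈ (pvDfsVisit (fun u j => (edges.getD u []).getD j 0 == 1) n' fB.length i fB).1 := by
        intro x
        rw [A1 x, B1 x]
        simp only [List.not_mem_nil, false_or, List.mem_singleton, exists_eq_left]
        rw [hbridge x, heroot x]
        constructor
        · intro h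
          have hxm : x ∈ fB := by
            rcases pvRch_mem ((heroot x).2 h) with rfl | hh
            · exact hiB
            · exact List.mem_of_mem_erase hh
          exact ⟨hxm, h⟩
        · rintro ⟨_, h⟩
          exact h
      -- the two leftover fresh lists are the same set
      have hfreshmem : ∀ x,
          x ∈ (pvBfsLoop ((List.range n').map
              (fun i => (List.range n').filter (fun j => (edges.getD i []).getD j 0 == 1)))
              [i] (fA.erase i) []).2 ↔
          x ∈ (pvDfsVisit (fun u j => (edges.getD u []).getD j 0 == 1) n' fB.length i fB).2 := by
        intro x
        rw [A2 x, B2 x]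
        simp only [List.mem_singleton, exists_eq_left]
        rw [heraseiff x, hbridge x, heroot x]
        constructor
        · rintro ⟨hxe, hnr⟩
          exact ⟨List.mem_of_mem_erase hxe, hnr⟩
        · rintro ⟨hxf, hnr⟩
          have hne : x ≠ i := fun h => hnr (h ▸ pvRch.refl)
          exact ⟨(List.Nodup.mem_erase_iff hBnd).2 ⟨hne, hxf⟩, hnr⟩
      have heqA : pvOuterA ((List.range n').map
          (fun i => (List.range n').filter (fun j => (edges.getD i []).getD j 0 == 1))) (i :: is) fA
          = (pvBfsLoop ((List.range n').map
              (fun i => (List.range n').filter (fun j => (edges.getD i []).getD j 0 == 1)))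
              [i] (fA.erase i) []).1 ::
            pvOuterA ((List.range n').map
              (fun i => (List.range n').filter (fun j => (edges.getD i []).getD j 0 == 1))) is
              (pvBfsLoop ((List.range n').map
                (fun i => (List.range n').filter (fun j => (edges.getD i []).getD j 0 == 1)))
                [i] (fA.erase i) []).2 := by
        rw [pvOuterA]
        simp [hiA]
      have heqB : pvOuterB (fun u j => (edges.getD u []).getD j 0 == 1) n' a (i :: is) fB res
          = pvOuterB (fun u j => (edges.getD u []).getD j 0 == 1) n' a is
              (pvDfsVisit (fun u j => (edges.getD u []).getD j 0 == 1) n' fB.length i fB).2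
              (pvAssignB a res
                (pvDfsVisit (fun u j => (edges.getD u []).getD j 0 == 1) n' fB.length i fB).1) := by
        rw [pvOuterB]
        simp [hiB]
      have hassign : pvAssignA a res (pvBfsLoop ((List.range n').map
              (fun i => (List.range n').filter (fun j => (edges.getD i []).getD j 0 == 1)))
              [i] (fA.erase i) []).1
          = pvAssignB a res
              (pvDfsVisit (fun u j => (edges.getD u []).getD j 0 == 1) n' fB.length i fB).1 :=
        pvAssign_eq a res A3 B3 hcompmem
      rw [heqA, List.foldl_cons, hassign, heqB]
      exact ih _ _ _ A4 B4 hfreshmem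
        (fun x hx => hsub x ((B2 x).1 hx).1)
    · have hiA : i ∉ fA := fun h => hiB ((hmem i).1 h)
      have heqA : pvOuterA ((List.range n').map
          (fun i => (List.range n').filter (fun j => (edges.getD i []).getD j 0 == 1))) (i :: is) fA
          = pvOuterA ((List.range n').map
          (fun i => (List.range n').filter (fun j => (edges.getD i []).getD j 0 == 1))) is fA := by
        rw [pvOuterA]
        simp [hiA]
      have heqB : pvOuterB (fun u j => (edges.getD u []).getD j 0 == 1) n' a (i :: is) fB res
          = pvOuterB (fun u j => (edges.getD u []).getD j 0 == 1) n' a is fB res := by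
        rw [pvOuterB]
        simp [hiB]
      rw [heqA, heqB]
      exact ih fA fB res hAnd hBnd hmem hsub

-- ===== VERDICT (by name: the statement is the Claim_ definition above) =====
-- the ports agree on every input (the precondition is not even needed for the ports' equality)
theorem pv_total (n : Int) (a : List Int) (edges : List (List Int)) :
    find_sorted_arrangement n a edges = find_sorted_arrangement_alt n a edges := by
  unfold find_sorted_arrangement find_sorted_arrangement_alt
  exact pvOuter_eq a edges n.toNat (List.range n.toNat) (List.range n.toNat) (List.range n.toNat)
    (List.replicate n.toNat 5) List.nodup_range List.nodup_range
    (fun x => Iff.rfl) (fun x hx => hx)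

theorem find_sorted_arrangement_spec : Claim_equal_find_sorted_arrangement := by
  intro n a edges _ _
  unfold Spec_find_sorted_arrangement
  exact pv_total n a edges
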